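-- pv_equiv track=rewrite | github.com/rjmurillo/ai-agents | scripts/ai_review/parsing.py | merge_verdicts
-- ===== SOURCE A (Python) =====
-- _FAIL_VERDICTS = frozenset({"CRITICAL_FAIL", "REJECTED", "FAIL"})
--
-- def merge_verdicts(verdicts: list[str]) -> str:
--     """Aggregate multiple verdicts: CRITICAL_FAIL/REJECTED/FAIL > WARN > PASS."""
--     if not verdicts:
--         return "PASS"
--
--     for v in verdicts:
--         if v in _FAIL_VERDICTS:
--             return "CRITICAL_FAIL"
--
--     if "WARN" in verdicts:
--         return "WARN"
--
--     return "PASS"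
-- ===== SOURCE B (Python) =====
-- _FAIL_VERDICTS = frozenset({"CRITICAL_FAIL", "REJECTED", "FAIL"})
--
-- def merge_verdicts(verdicts: list[str]) -> str:
--     """Aggregate multiple verdicts: CRITICAL_FAIL/REJECTED/FAIL > WARN > PASS."""
--     saw_warn = False
--     for v in verdicts:
--         if v in _FAIL_VERDICTS:
--             return "CRITICAL_FAIL"
--         if v == "WARN":
--             saw_warn = True
--     return "WARN" if saw_warn else "PASS"
-- ===== Notes on version B (the rewrite author's own statement) =====
-- stated objective: simpler
-- what changed: Replaces A's empty-list guard plus two sequential scans (fail scan, then a separate 'WARN' membership scan) with a single pass that carries a saw_warn flag and falls through to PASS.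
import Mathlib
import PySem

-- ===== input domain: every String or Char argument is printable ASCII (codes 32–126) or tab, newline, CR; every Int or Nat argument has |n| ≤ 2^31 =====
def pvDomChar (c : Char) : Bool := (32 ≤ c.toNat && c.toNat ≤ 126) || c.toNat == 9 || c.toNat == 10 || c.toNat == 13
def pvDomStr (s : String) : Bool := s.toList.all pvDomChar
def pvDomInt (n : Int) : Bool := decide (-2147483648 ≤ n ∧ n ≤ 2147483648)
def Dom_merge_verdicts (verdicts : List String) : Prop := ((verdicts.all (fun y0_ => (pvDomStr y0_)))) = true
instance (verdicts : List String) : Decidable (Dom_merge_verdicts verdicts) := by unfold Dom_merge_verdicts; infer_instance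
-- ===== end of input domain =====

-- B replaces A's empty-list guard and two sequential scans with a single pass carrying a saw_warn flag (simpler decomposition).


-- ===== PORT A =====
-- the for-loop with early return: some "CRITICAL_FAIL" if a fail verdict is seen, none if the loop falls through
def mvFailLoop : List String → Option String
  | [] => none
  | v :: rest =>
    if v = "CRITICAL_FAIL" || v = "REJECTED" || v = "FAIL" then some "CRITICAL_FAIL"
    else mvFailLoop rest

def merge_verdicts (verdicts : List String) : String :=
  if verdicts = [] then "PASS"
  else
    match mvFailLoop verdicts with
    | some r => r
    | none => if verdicts.contains "WARN" then "WARN" else "PASS"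

-- ===== PORT B =====
-- single pass carrying the saw_warn flag
def mvOnePass : List String → Bool → String
  | [], sawWarn => if sawWarn then "WARN" else "PASS"
  | v :: rest, sawWarn =>
    if v = "CRITICAL_FAIL" || v = "REJECTED" || v = "FAIL" then "CRITICAL_FAIL"
    else mvOnePass rest (sawWarn || v = "WARN")

def merge_verdicts_alt (verdicts : List String) : String :=
  mvOnePass verdicts false

-- ===== PRECONDITION & SPEC =====
def Spec_merge_verdicts (verdicts : List String) (out : String) : Prop := out = merge_verdicts_alt verdicts
instance (verdicts : List String) (out : String) : Decidable (Spec_merge_verdicts verdicts out) := by unfold Spec_merge_verdicts; infer_instance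

-- ===== CLAIM (what is proved, stated in full; the proofs are below) =====
def Claim_equal_merge_verdicts : Prop := ∀ (verdicts : List String), Dom_merge_verdicts verdicts → Spec_merge_verdicts verdicts (merge_verdicts verdicts)

-- ===== LEMMAS AND PROOFS =====
theorem mvOnePass_eq (vs : List String) : ∀ sw : Bool,
    mvOnePass vs sw =
      match mvFailLoop vs with
      | some r => r
      | none => if sw || vs.contains "WARN" then "WARN" else "PASS" := by
  induction vs with
  | nil => intro sw; simp [mvOnePass, mvFailLoop]
  | cons v rest ih =>
    intro sw
    by_cases h : v = "CRITICAL_FAIL" || v = "REJECTED" || v = "FAIL"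
    · simp [mvOnePass, mvFailLoop, h]
    · simp only [mvOnePass, mvFailLoop, h, if_neg, Bool.false_eq_true, not_false_eq_true, ih]
      cases hf : mvFailLoop rest with
      | some r => simp
      | none =>
        simp only [List.contains_cons]
        by_cases hw : v = "WARN" <;>
          simp only [List.mem_cons, hw, Bool.or_eq_true, beq_iff_eq] <;>
          split_ifs with h1 h2 <;> first | rfl | (exfalso; tauto)
-- ===== VERDICT (by name: the statement is the Claim_ definition above) =====
theorem merge_verdicts_spec : Claim_equal_merge_verdicts := by
  intro vs _
  unfold Spec_merge_verdicts merge_verdicts merge_verdicts_alt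
  rw [mvOnePass_eq]
  cases vs with
  | nil => simp [mvFailLoop]
  | cons v rest => simp
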